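-- pv_equiv track=rewrite | github.com/DavidLKing/genpara | bert_10_fold.py | split_by_label
-- ===== SOURCE A (Python) =====
-- def split_by_label(data, folds, labels):
--     splits = {}
--     curr_num = 0
--     for fold in labels:
--         dev = [x for x in data if x[2] in fold]
--         train = [x for x in data if x[2] not in fold]
--         splits[curr_num] = {}
--         splits[curr_num]['train'] = train
--         splits[curr_num]['dev'] = dev
--         curr_num += 1
--     return splits
-- ===== SOURCE B (Python) =====
-- def split_by_label(data, folds, labels):
--     # one pass over data: build every fold's train/dev simultaneously
--     pairs = [([], []) for _ in labels]
--     for x in data: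
--         for fold, (train, dev) in zip(labels, pairs):
--             (dev if x[2] in fold else train).append(x)
--     return {i: {'train': train, 'dev': dev} for i, (train, dev) in enumerate(pairs)}
-- ===== Notes on version B (the rewrite author's own statement) =====
-- stated objective: alternative
-- what changed: Loop interchange: instead of F separate scans of data (two filtering comprehensions per fold), B makes a single pass over data, appending each element to every fold's train or dev list simultaneously, then emits the numbered dict-of-dicts at the end.
import Mathlib
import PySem

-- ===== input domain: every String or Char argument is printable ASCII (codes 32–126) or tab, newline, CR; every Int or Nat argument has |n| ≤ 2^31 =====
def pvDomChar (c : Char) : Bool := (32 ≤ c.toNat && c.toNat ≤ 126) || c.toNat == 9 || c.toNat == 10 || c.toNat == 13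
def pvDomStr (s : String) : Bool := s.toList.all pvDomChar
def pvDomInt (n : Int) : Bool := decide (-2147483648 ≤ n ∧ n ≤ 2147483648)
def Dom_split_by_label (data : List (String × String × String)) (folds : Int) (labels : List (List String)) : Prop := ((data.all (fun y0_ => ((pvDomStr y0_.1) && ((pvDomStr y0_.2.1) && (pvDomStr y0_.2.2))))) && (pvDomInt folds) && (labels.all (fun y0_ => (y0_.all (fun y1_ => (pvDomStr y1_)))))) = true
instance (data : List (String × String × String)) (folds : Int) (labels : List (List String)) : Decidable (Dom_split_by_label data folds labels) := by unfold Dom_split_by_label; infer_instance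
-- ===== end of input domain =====

-- B does one pass over data, building every fold's train/dev lists simultaneously (A scans data twice per fold); total, same results.

-- ===== PORT A =====
-- nested assignment splits[curr_num][key] = v is ported as read-modify-write on the outer dict
def split_by_label (data : List (String × String × String)) (folds : Int) (labels : List (List String)) : List (Int × List (String × List (String × String × String))) :=
  let st := labels.foldl
    (fun (st : PySem.Dict Int (PySem.Dict String (List (String × String × String))) × Int) fold =>
      let dev := data.filter (fun x => fold.contains x.2.2)
      let train := data.filter (fun x => !fold.contains x.2.2)
      let splits := st.1.insert st.2 PySem.Dict.empty
      let splits := splits.insert st.2 ((splits.getD st.2 PySem.Dict.empty).insert "train" train)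
      let splits := splits.insert st.2 ((splits.getD st.2 PySem.Dict.empty).insert "dev" dev)
      (splits, st.2 + 1))
    (PySem.Dict.empty, 0)
  st.1.items.map (fun p => (p.1, p.2.items))

-- ===== PORT B =====
-- '(dev if … else train).append(x)' mutates one component of the pair; ported by rebuilding the pairs list
def split_by_label_alt (data : List (String × String × String)) (folds : Int) (labels : List (List String)) : List (Int × List (String × List (String × String × String))) :=
  let pairs : List (List (String × String × String) × List (String × String × String)) :=
    labels.map (fun _ => ([], []))
  let pairs := data.foldl
    (fun pairs x => (labels.zip pairs).map
      (fun q => if q.1.contains x.2.2 then (q.2.1, q.2.2 ++ [x]) else (q.2.1 ++ [x], q.2.2)))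
    pairs
  (PySem.List.enumerate pairs 0).map (fun q => (q.1, [("train", q.2.1), ("dev", q.2.2)]))

-- ===== PRECONDITION & SPEC =====
def Spec_split_by_label (data : List (String × String × String)) (folds : Int) (labels : List (List String)) (out : List (Int × List (String × List (String × String × String)))) : Prop := out = split_by_label_alt data folds labels
-- infer_instance fails to find DecidableEq for this nested type; the instance is given explicitly
instance (data : List (String × String × String)) (folds : Int) (labels : List (List String)) (out : List (Int × List (String × List (String × String × String)))) : Decidable (Spec_split_by_label data folds labels out) := by
  unfold Spec_split_by_label
  exact @instDecidableEqList _ (fun a b => instDecidableEqProd a b) _ _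

-- ===== CLAIM (what is proved, stated in full; the proofs are below) =====
def Claim_equal_split_by_label : Prop := ∀ (data : List (String × String × String)) (folds : Int) (labels : List (List String)), Dom_split_by_label data folds labels → Spec_split_by_label data folds labels (split_by_label data folds labels)

-- ===== LEMMAS AND PROOFS =====

-- the common normal form: fold i (key n + i) maps to [("train", data not-in fold), ("dev", data in fold)]
def outList (data : List (String × String × String)) (n : Int) : List (List String) → List (Int × List (String × List (String × String × String)))
  | [] => []
  | f :: t => (n, [("train", data.filter (fun x => !decide (x.2.2 ∈ f))), ("dev", data.filter (fun x => decide (x.2.2 ∈ f)))]) :: outList data (n + 1) t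

lemma zip_self_map {α β γ : Type} (ls : List α) (f : α → β) (g : α × β → γ) :
    (ls.zip (ls.map f)).map g = ls.map (fun l => g (l, f l)) := by
  induction ls with
  | nil => simp
  | cons h t ih => simp [ih]

lemma B_loop (data : List (String × String × String)) (ls : List (List String)) (pre : List (String × String × String)) :
    data.foldl
      (fun pairs x => (ls.zip pairs).map
        (fun q => if q.1.contains x.2.2 then (q.2.1, q.2.2 ++ [x]) else (q.2.1 ++ [x], q.2.2)))
      (ls.map (fun fold => (pre.filter (fun x => !fold.contains x.2.2), pre.filter (fun x => fold.contains x.2.2)))) =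
    ls.map (fun fold => ((pre ++ data).filter (fun x => !fold.contains x.2.2), (pre ++ data).filter (fun x => fold.contains x.2.2))) := by
  induction data generalizing pre with
  | nil => simp
  | cons x t ih =>
      rw [List.foldl_cons, zip_self_map]
      have hstep : (ls.map (fun l =>
          if l.contains x.2.2 then
            (pre.filter (fun y => !l.contains y.2.2), pre.filter (fun y => l.contains y.2.2) ++ [x])
          else
            (pre.filter (fun y => !l.contains y.2.2) ++ [x], pre.filter (fun y => l.contains y.2.2)))) =
          ls.map (fun fold => ((pre ++ [x]).filter (fun y => !fold.contains y.2.2), (pre ++ [x]).filter (fun y => fold.contains y.2.2))) := by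
        apply List.map_congr_left
        intro l _
        by_cases hx : x.2.2 ∈ l <;> simp [hx, List.filter_append]
      rw [hstep, ih (pre ++ [x])]
      simp

lemma B_out (data : List (String × String × String)) (ls : List (List String)) (n : Int) :
    (PySem.List.enumerate (ls.map (fun fold => (data.filter (fun x => !fold.contains x.2.2), data.filter (fun x => fold.contains x.2.2)))) n).map
      (fun q => (q.1, [("train", q.2.1), ("dev", q.2.2)])) = outList data n ls := by
  induction ls generalizing n with
  | nil => simp [outList]
  | cons f t ih =>
      rw [List.map_cons, PySem.List.enumerate_cons, List.map_cons, outList, ← ih (n + 1)]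
      simp

lemma A_loop (data : List (String × String × String)) (ls : List (List String))
    (d : PySem.Dict Int (PySem.Dict String (List (String × String × String)))) (n : Int)
    (h : ∀ k ∈ d.keys, k < n) :
    ((ls.foldl
      (fun (st : PySem.Dict Int (PySem.Dict String (List (String × String × String))) × Int) fold =>
        let dev := data.filter (fun x => fold.contains x.2.2)
        let train := data.filter (fun x => !fold.contains x.2.2)
        let splits := st.1.insert st.2 PySem.Dict.empty
        let splits := splits.insert st.2 ((splits.getD st.2 PySem.Dict.empty).insert "train" train)
        let splits := splits.insert st.2 ((splits.getD st.2 PySem.Dict.empty).insert "dev" dev)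
        (splits, st.2 + 1))
      (d, n)).1.items.map (fun p => (p.1, p.2.items))) =
    d.items.map (fun p => (p.1, p.2.items)) ++ outList data n ls := by
  induction ls generalizing d n with
  | nil => simp [outList]
  | cons f t ih =>
      rw [List.foldl_cons]
      have hc : d.contains n = false := by
        cases hx : d.contains n
        · rfl
        · have : n ∈ d.keys := (PySem.Dict.contains_iff_mem_keys d n).mp hx
          have := h n this
          omega
      have hnot : ∀ p ∈ d.items, p.1 ≠ n := by
        intro p hp hpn
        have hk : p.1 ∈ d.keys := PySem.Dict.mem_keys_of_mem_items d hp
        have := h p.1 hk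
        omega
      set dev := data.filter (fun x => f.contains x.2.2) with hdev
      set train := data.filter (fun x => !f.contains x.2.2) with htrain
      set s1 := d.insert n (PySem.Dict.empty : PySem.Dict String (List (String × String × String))) with hs1
      have hg1 : s1.getD n PySem.Dict.empty = PySem.Dict.empty := PySem.Dict.getD_insert_self _ _ _ _
      set i1 := (PySem.Dict.empty : PySem.Dict String (List (String × String × String))).insert "train" train with hi1
      set s2 := s1.insert n i1 with hs2
      have hg2 : s2.getD n PySem.Dict.empty = i1 := PySem.Dict.getD_insert_self _ _ _ _
      set i2 := i1.insert "dev" dev with hi2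
      set s3 := s2.insert n i2 with hs3
      have hmapid : ∀ (v : PySem.Dict String (List (String × String × String))),
          d.items.map (fun p => if p.1 == n then (n, v) else p) = d.items := by
        intro v
        rw [List.map_congr_left (g := id) (fun p hp => by simp [hnot p hp]), List.map_id]
      have hs1items : s1.items = d.items ++ [(n, PySem.Dict.empty)] :=
        PySem.Dict.items_insert_of_not_contains d _ hc
      have hs2items : s2.items = d.items ++ [(n, i1)] := by
        rw [hs2, PySem.Dict.items_insert_of_contains s1 i1 (PySem.Dict.contains_insert_self d n _),
          hs1items, List.map_append, hmapid]
        simp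
      have hs3items : s3.items = d.items ++ [(n, i2)] := by
        rw [hs3, PySem.Dict.items_insert_of_contains s2 i2 (PySem.Dict.contains_insert_self s1 n _),
          hs2items, List.map_append, hmapid]
        simp
      have hi1c : i1.contains "dev" = false := by
        rw [hi1, PySem.Dict.contains_insert]
        decide
      have hi2items : i2.items = [("train", train), ("dev", dev)] := by
        rw [hi2, PySem.Dict.items_insert_of_not_contains i1 dev hi1c, hi1,
          PySem.Dict.items_insert_of_not_contains PySem.Dict.empty train (PySem.Dict.contains_empty _)]
        have he : (PySem.Dict.empty : PySem.Dict String (List (String × String × String))).items = [] := rfl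
        simp [he]
      have hkeys : ∀ k ∈ s3.keys, k < n + 1 := by
        intro k hk
        rcases (PySem.Dict.mem_keys_insert s2 n k i2).mp hk with hkn | hk2
        · omega
        rcases (PySem.Dict.mem_keys_insert s1 n k i1).mp hk2 with hkn | hk1
        · omega
        rcases (PySem.Dict.mem_keys_insert d n k _).mp hk1 with hkn | hkd
        · omega
        · have := h k hkd; omega
      simp only []
      rw [hg1]
      rw [show s1.insert n (PySem.Dict.empty.insert "train" train) = s2 from rfl]
      rw [hg2]
      rw [show s2.insert n (i1.insert "dev" dev) = s3 from rfl]
      rw [ih s3 (n + 1) hkeys, hs3items, List.map_append, outList]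
      simp [hi2items, htrain, hdev]

-- ===== VERDICT (by name: the statement is the Claim_ definition above) =====
theorem split_by_label_spec : Claim_equal_split_by_label := by
  intro data folds labels _
  unfold Spec_split_by_label split_by_label split_by_label_alt
  have hA := A_loop data labels PySem.Dict.empty 0 (by simp [PySem.Dict.keys_empty])
  simp only [] at hA ⊢
  rw [hA]
  have hinit : (labels.map (fun (_ : List String) => (([] : List (String × String × String)), ([] : List (String × String × String))))) =
      labels.map (fun fold => (([] : List (String × String × String)).filter (fun x => !fold.contains x.2.2), ([] : List (String × String × String)).filter (fun x => fold.contains x.2.2))) := by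
    simp
  rw [hinit, B_loop data labels [], List.nil_append, B_out]
  have : (PySem.Dict.empty : PySem.Dict Int (PySem.Dict String (List (String × String × String)))).items = [] := rfl
  rw [this]
  simp
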